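-- pv_equiv track=rewrite | github.com/hydrosolutions/long-term-forecasting | scr/data_utils.py | get_relative_scaling_features
-- ===== SOURCE A (Python) =====
-- def get_relative_scaling_features(features, relative_scaling_vars):
--     """
--     Identify features that should use relative scaling based on pattern matching.
--
--     Parameters:
--     -----------
--     features : list
--         List of all feature column names
--     relative_scaling_vars : list
--         List of variable patterns to match (e.g., ["SWE", "T", "discharge"])
--
--     Returns:
--     --------
--     list
--         List of features that match any of the patterns
--
--     Example:
--     --------
--     >>> features = ["SWE_1", "SWE_2", "SWE_Perc_Elev_1", "P_1", "discharge"]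
--     >>> relative_scaling_vars = ["SWE", "discharge"]
--     >>> get_relative_scaling_features(features, relative_scaling_vars)
--     ["SWE_1", "SWE_2", "SWE_Perc_Elev_1", "discharge"]
--     """
--     if not relative_scaling_vars:
--         return []
--
--     relative_features = []
--     for feature in features:
--         for var_pattern in relative_scaling_vars:
--             # Check if the feature starts with the pattern followed by underscore or is exact match
--             if feature == var_pattern or feature.startswith(f"{var_pattern}_"):
--                 relative_features.append(feature)
--                 break  # No need to check other patterns for this feature
--
--     return relative_features
-- ===== SOURCE B (Python) =====
-- def get_relative_scaling_features(features, relative_scaling_vars):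
--     # Hash the patterns once; for each feature test only its underscore-delimited
--     # prefixes (the feature itself and every prefix cut just before an underscore).
--     patterns = set(relative_scaling_vars)
--     return [f for f in features
--             if any(p in patterns
--                    for p in [f] + [f[:i] for i, c in enumerate(f) if c == "_"])]
-- ===== Notes on version B (the rewrite author's own statement) =====
-- stated objective: faster
-- what changed: Instead of scanning every pattern for every feature, B hashes the patterns into a set once and tests each feature's underscore-delimited prefixes for membership, removing the inner scan over patterns.
import Mathlib
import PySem

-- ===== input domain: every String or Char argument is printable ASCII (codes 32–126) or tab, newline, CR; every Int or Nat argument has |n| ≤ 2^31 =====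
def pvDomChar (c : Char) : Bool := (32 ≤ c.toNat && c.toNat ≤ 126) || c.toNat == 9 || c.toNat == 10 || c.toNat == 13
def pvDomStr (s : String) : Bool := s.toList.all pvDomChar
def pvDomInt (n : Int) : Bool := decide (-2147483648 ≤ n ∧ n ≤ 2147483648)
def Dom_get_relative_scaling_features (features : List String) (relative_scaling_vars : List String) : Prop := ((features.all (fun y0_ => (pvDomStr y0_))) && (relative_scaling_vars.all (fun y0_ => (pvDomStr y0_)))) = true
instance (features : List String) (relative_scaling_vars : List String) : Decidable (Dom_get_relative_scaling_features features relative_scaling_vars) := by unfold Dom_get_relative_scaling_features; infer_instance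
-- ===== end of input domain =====

-- B hashes the patterns into a set once and tests each feature's underscore-delimited prefixes for membership, removing the inner scan over patterns (faster).


-- ===== PORT A =====
-- inner 'for var_pattern in relative_scaling_vars: … break': true iff some pattern matched
def pvMatchA (feature : String) : List String → Bool
  | [] => false
  | var_pattern :: rest =>
      if feature = var_pattern || PySem.Str.startswith feature (var_pattern ++ "_") then true
      else pvMatchA feature rest

def get_relative_scaling_features (features : List String) (relative_scaling_vars : List String) : List String :=
  if relative_scaling_vars = [] then []
  else
    features.foldl
      (fun relative_features feature =>
        if pvMatchA feature relative_scaling_vars then relative_features ++ [feature]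
        else relative_features) []

-- ===== PORT B =====
-- candidate prefixes of Source B: [f] + [f[:i] for i, c in enumerate(f) if c == "_"]
def pvCands (f : String) : List String :=
  f :: (PySem.List.enumerate f.toList).filterMap
        (fun ic => if ic.2 = '_' then some (PySem.Str.slice f none (some ic.1)) else none)

def get_relative_scaling_features_alt (features : List String) (relative_scaling_vars : List String) : List String :=
  let patterns : PySem.Set String := PySem.Set.ofList relative_scaling_vars
  features.filter (fun f => (pvCands f).any (fun p => PySem.Set.contains patterns p))

-- ===== PRECONDITION & SPEC =====
def Spec_get_relative_scaling_features (features : List String) (relative_scaling_vars : List String) (out : List String) : Prop := out = get_relative_scaling_features_alt features relative_scaling_vars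
instance (features : List String) (relative_scaling_vars : List String) (out : List String) : Decidable (Spec_get_relative_scaling_features features relative_scaling_vars out) := by unfold Spec_get_relative_scaling_features; infer_instance

-- ===== CLAIM (what is proved, stated in full; the proofs are below) =====
def Claim_equal_get_relative_scaling_features : Prop := ∀ (features : List String) (relative_scaling_vars : List String), Dom_get_relative_scaling_features features relative_scaling_vars → Spec_get_relative_scaling_features features relative_scaling_vars (get_relative_scaling_features features relative_scaling_vars)

-- ===== LEMMAS AND PROOFS =====

-- ===== VERDICT (by name: the statement is the Claim_ definition above) =====
-- position characterization of membership in enumerate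
lemma mem_enumerate' (cs : List Char) (st i : Int) (c : Char) :
    (i, c) ∈ PySem.List.enumerate cs st ↔ ∃ n : Nat, cs[n]? = some c ∧ i = st + n := by
  induction cs generalizing st with
  | nil => simp [PySem.List.enumerate]
  | cons x xs ih =>
    rw [PySem.List.enumerate_cons, List.mem_cons, ih]
    constructor
    · rintro (h | ⟨n, hn, rfl⟩)
      · obtain ⟨rfl, rfl⟩ := Prod.mk.injEq .. ▸ h
        exact ⟨0, by simp⟩
      · exact ⟨n + 1, by simpa using hn, by push_cast; ring⟩
    · rintro ⟨n, hn, rfl⟩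
      cases n with
      | zero => left; simp at hn; simp [hn]
      | succ n => right; exact ⟨n, by simpa using hn, by push_cast; ring⟩

-- membership in Source B's filterMap of enumerate, characterized by position
lemma mem_cands_aux (f q : String) :
    q ∈ (PySem.List.enumerate f.toList).filterMap
          (fun ic => if ic.2 = '_' then some (PySem.Str.slice f none (some ic.1)) else none)
      ↔ ∃ n : Nat, f.toList[n]? = some '_' ∧ q = PySem.Str.slice f none (some ((0 : Int) + n)) := by
  rw [List.mem_filterMap]
  constructor
  · rintro ⟨⟨i, c⟩, hmem, hq⟩
    split_ifs at hq with hc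
    · injection hq with hq
      subst hc
      obtain ⟨n, hn, rfl⟩ := (mem_enumerate' f.toList 0 i '_').mp hmem
      exact ⟨n, hn, hq.symm⟩
  · rintro ⟨n, hn, rfl⟩
    exact ⟨((0 : Int) + n, '_'), (mem_enumerate' f.toList 0 _ '_').mpr ⟨n, hn, rfl⟩, by simp⟩

lemma mem_cands (f p : String) :
    p ∈ pvCands f ↔ (f = p ∨ PySem.Str.startswith f (p ++ "_") = true) := by
  unfold pvCands
  rw [List.mem_cons, mem_cands_aux]
  simp only [PySem.Str.startswith_eq, String.toList_append, PySem.Chars.startswith_iff]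
  have htl : ("_" : String).toList = ['_'] := rfl
  rw [htl]
  constructor
  · rintro (rfl | ⟨n, hn, rfl⟩)
    · exact Or.inl rfl
    · right
      have hlt : n < f.toList.length := by
        by_contra h
        rw [List.getElem?_eq_none (by omega)] at hn
        cases hn
      have hsl : (PySem.Str.slice f none (some ((0 : Int) + n))).toList = f.toList.take n := by
        simp [PySem.Str.slice, PySem.List.slice_to_natCast]
      have h1 : f.toList.take n ++ ['_'] = f.toList.take (n + 1) := by
        rw [List.take_add_one, hn]
        rfl
      rw [hsl, h1]
      exact List.take_prefix _ _
  · rintro (rfl | hpre)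
    · exact Or.inl rfl
    · right
      set n := p.toList.length with hn
      have hl : n + 1 ≤ f.toList.length := by
        have := hpre.length_le
        simpa [hn] using this
      have htake : p.toList ++ ['_'] = f.toList.take (n + 1) := by
        have := List.prefix_iff_eq_take.mp hpre
        simpa [hn] using this
      rw [List.take_add_one] at htake
      have hlen : (f.toList.take n).length = n := by
        rw [List.length_take]
        omega
      obtain ⟨h1, h2⟩ := List.append_inj htake (by rw [hlen, hn])
      have hget : f.toList[n]? = some '_' := by
        cases hx : f.toList[n]? with
        | none => rw [hx] at h2; simp at h2
        | some c =>
          rw [hx] at h2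
          simp at h2
          rw [← h2]
      have hsl : (PySem.Str.slice f none (some ((0 : Int) + n))).toList = f.toList.take n := by
        simp [PySem.Str.slice, PySem.List.slice_to_natCast]
      refine ⟨n, hget, ?_⟩
      apply String.toList_inj.mp
      rw [hsl]
      exact h1

lemma matchA_true_iff (f : String) (vars : List String) :
    pvMatchA f vars = true ↔ ∃ v ∈ vars, (f = v ∨ PySem.Str.startswith f (v ++ "_") = true) := by
  induction vars with
  | nil => simp [pvMatchA]
  | cons v rest ih =>
    unfold pvMatchA
    by_cases h : f = v || PySem.Str.startswith f (v ++ "_")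
    · simp only [if_pos h]
      simp only [Bool.or_eq_true, decide_eq_true_eq] at h
      simpa using Or.inl h
    · rw [if_neg h, ih]
      simp only [Bool.or_eq_true, decide_eq_true_eq] at h
      push_neg at h
      constructor
      · rintro ⟨w, hw, hm⟩; exact ⟨w, List.mem_cons_of_mem _ hw, hm⟩
      · rintro ⟨w, hw, hm⟩
        rcases List.mem_cons.mp hw with rfl | hw'
        · rcases hm with rfl | hs
          · exact absurd rfl h.1
          · exact absurd hs h.2
        · exact ⟨w, hw', hm⟩

lemma matchA_eq_any (f : String) (vars : List String) :
    pvMatchA f vars = (pvCands f).any (fun p => PySem.Set.contains (PySem.Set.ofList vars) p) := by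
  rw [Bool.eq_iff_iff, matchA_true_iff, List.any_eq_true]
  constructor
  · rintro ⟨v, hv, hm⟩
    exact ⟨v, (mem_cands f v).mpr hm, (PySem.Set.contains_iff _ _).mpr ((PySem.Set.mem_ofList _ _).mpr hv)⟩
  · rintro ⟨q, hq, hc⟩
    exact ⟨q, (PySem.Set.mem_ofList _ _).mp ((PySem.Set.contains_iff _ _).mp hc), (mem_cands f q).mp hq⟩

theorem get_relative_scaling_features_spec : Claim_equal_get_relative_scaling_features := by
  intro features vars _
  unfold Spec_get_relative_scaling_features get_relative_scaling_features get_relative_scaling_features_alt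
  by_cases hv : vars = []
  · subst hv
    rw [if_pos rfl]
    rw [List.filter_congr (q := fun _ => false) (fun f _ => ?_), List.filter_false]
    simp only [List.any_eq_false]
    intro p _
    simp only [Bool.not_eq_true]
    by_contra h
    simp only [Bool.not_eq_false] at h
    exact absurd ((PySem.Set.mem_ofList _ _).mp ((PySem.Set.contains_iff _ _).mp h)) (by simp)
  · rw [if_neg hv]
    have := PySem.List.foldl_append_if (fun feature => pvMatchA feature vars) (fun x => x) features []
    simp only [List.map_id'] at this
    rw [this, List.nil_append]
    exact List.filter_congr (fun f _ => matchA_eq_any f vars)
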